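-- pv_equiv track=rewrite | github.com/michal-kowal/OK_project | GA.py | mutation7
-- ===== SOURCE A (Python) =====
-- def mutation7(child, matrix): #zmienia numery kolorów na n pierwszych liczb naturalnych (n - liczba kolorów chromosomu), ale sprawia, że chromosomy są zbyt podobne
--     colors = []
--     for i in range(len(child)):
--         if child[i] not in colors:
--             colors.append(child[i])
--     i=0
--     while 1:
--         maximum=max(colors)
--         while i in colors:
--             i+=1
--         if(i>maximum):
--             break
--         else:
--             for j in range(len(child)):
--                 if child[j]==maximum:
--                     child[j]=i
--             colors[colors.index(maximum)]=i
--     return child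
-- ===== SOURCE B (Python) =====
-- # Sort the distinct colors once, then relabel by a two-pointer merge: hi walks the
-- # sorted colors from the top while (lo, slot) advances through the ascending missing
-- # natural slots, pairing each high color with the next free slot until slot > color;
-- # the map is built once and the chromosome rewritten in a single pass.
-- # Like A, mutates child in place and returns it.
-- def mutation7(child, matrix):
--     asc = sorted(set(child))
--     mapping = {}
--     lo = 0
--     slot = 0
--     hi = len(asc) - 1
--     while hi >= 0:
--         c = asc[hi]
--         while lo < len(asc) and asc[lo] < slot:
--             lo += 1
--         while lo < len(asc) and asc[lo] == slot:
--             slot += 1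
--             lo += 1
--         if slot > c:
--             break
--         mapping[c] = slot
--         slot += 1
--         hi -= 1
--     child[:] = [mapping.get(c, c) for c in child]
--     return child
-- ===== Notes on version B (the rewrite author's own statement) =====
-- stated objective: faster
-- what changed: Instead of repeatedly scanning for the current maximum color, membership-testing slot candidates against the color list and rewriting the whole chromosome once per relabeled color, B sorts the distinct colors once and builds the relabeling map by a two-pointer merge (hi walks the sorted colors from the top, (lo, slot) advances through the ascending missing slots), then rewrites the child in a single pass.
import Mathlib
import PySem

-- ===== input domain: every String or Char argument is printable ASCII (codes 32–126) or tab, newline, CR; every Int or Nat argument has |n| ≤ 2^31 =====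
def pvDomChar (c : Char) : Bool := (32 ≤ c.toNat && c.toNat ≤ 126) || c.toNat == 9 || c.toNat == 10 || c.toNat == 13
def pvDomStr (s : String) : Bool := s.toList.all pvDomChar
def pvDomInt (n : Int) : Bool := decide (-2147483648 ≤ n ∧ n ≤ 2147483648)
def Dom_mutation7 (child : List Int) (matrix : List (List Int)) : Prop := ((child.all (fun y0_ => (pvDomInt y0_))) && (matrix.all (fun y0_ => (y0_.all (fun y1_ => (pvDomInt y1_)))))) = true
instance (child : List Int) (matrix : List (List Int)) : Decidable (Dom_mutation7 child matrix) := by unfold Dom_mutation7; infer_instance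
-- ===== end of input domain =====

-- B sorts the distinct colors once and builds the relabeling map by a two-pointer merge
-- (hi walks the sorted colors downward, (lo, slot) advances through the ascending missing
-- slots), then rewrites the child in ONE pass, instead of A's find-max / membership-scan /
-- rewrite-whole-child-per-color loop. Both Pythons mutate `child` in place and return it;
-- the equivalence proved here is about the returned value.

theorem pvFilterMono (t : List Int) (p q : Int → Bool) (h : ∀ x, p x = true → q x = true) :
    (t.filter p).length ≤ (t.filter q).length :=
  List.Sublist.length_le (List.monotone_filter_right t h)

-- termination measure fact for nextFree (cited by its decreasing_by)
theorem pvNextFreeDec (l : List Int) (i : Int) (h : i ∈ l) :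
    (l.filter (fun x => i + 1 ≤ x)).length < (l.filter (fun x => i ≤ x)).length := by
  induction l with
  | nil => simp at h
  | cons a t ih =>
    have hmono := pvFilterMono t (fun x => decide (i + 1 ≤ x)) (fun x => decide (i ≤ x))
      (by intro x hx; simp only [decide_eq_true_eq] at hx ⊢; omega)
    simp only [List.filter_cons]
    rcases List.mem_cons.1 h with rfl | ha
    · split_ifs with h1 h2 h2 <;>
        (simp only [decide_eq_true_eq] at h1 h2) <;>
        (try simp only [List.length_cons]) <;> omega
    · have hlt := ih ha
      split_ifs with h1 h2 h2 <;>
        (simp only [decide_eq_true_eq] at h1 h2) <;>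
        (try simp only [List.length_cons]) <;> omega

-- ===== PORT A =====
-- A's inner loop `while i in colors: i += 1`; this is its exact port
-- (terminates: each step removes a member of l that is ≥ i from the candidates).
def nextFree (l : List Int) (i : Int) : Int :=
  if h : l.contains i then nextFree l (i + 1) else i
termination_by (l.filter (fun x => i ≤ x)).length
decreasing_by
  exact pvNextFreeDec l i (by simpa using h)

-- ports `colors[colors.index(m)] = v` (replace the first occurrence of m by v)
def replaceFirst : List Int → Int → Int → List Int
  | [], _, _ => []
  | x :: xs, m, v => if x = m then v :: xs else x :: replaceFirst xs m v

-- the `while 1:` loop of A. Fuel: each non-break iteration relabels one distinct original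
-- color, so the loop body runs at most `colors.length + 1` times (fuel 0 is never reached);
-- `max(colors)` is Python max of a nonempty list (colors = [] only when child = [], excluded by Pre_).
def mutationLoop : Nat → Int → List Int → List Int → List Int
  | 0, _, _, child => child
  | fuel + 1, i, colors, child =>
    let maximum := (PySem.List.max? colors (fun y => y)).getD 0
    let i' := nextFree colors i
    if i' > maximum then child
    else mutationLoop fuel i' (replaceFirst colors maximum i')
           (child.map (fun x => if x = maximum then i' else x))

def mutation7 (child : List Int) (matrix : List (List Int)) : List Int :=
  -- `colors`: first-occurrence dedup loop of A (this foldl IS that loop)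
  let colors := child.foldl (fun acc c => if acc.contains c then acc else acc ++ [c]) []
  mutationLoop (colors.length + 1) 0 colors child

-- ===== PORT B =====
-- B's `while lo < len(asc) and asc[lo] < slot: lo += 1`
def skipBelow (asc : List Int) (lo : Nat) (slot : Int) : Nat :=
  if _h : lo < asc.length then
    if asc.getD lo 0 < slot then skipBelow asc (lo + 1) slot else lo
  else lo
termination_by asc.length - lo

-- B's `while lo < len(asc) and asc[lo] == slot: slot += 1; lo += 1`
def skipRun (asc : List Int) (lo : Nat) (slot : Int) : Nat × Int :=
  if _h : lo < asc.length then
    if asc.getD lo 0 = slot then skipRun asc (lo + 1) (slot + 1) else (lo, slot)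
  else (lo, slot)
termination_by asc.length - lo

-- B's `while hi >= 0:` loop; the Nat argument is the Python `hi` plus one (the loop runs
-- while it is positive), and the returned pair list is `mapping` in insertion order.
def buildPairs (asc : List Int) : Nat → Nat → Int → List (Int × Int)
  | 0, _, _ => []
  | h + 1, lo, slot =>
    let c := asc.getD h 0
    let lo1 := skipBelow asc lo slot
    let p := skipRun asc lo1 slot
    if p.2 > c then []
    else (c, p.2) :: buildPairs asc h p.1 (p.2 + 1)

def mutation7_alt (child : List Int) (matrix : List (List Int)) : List Int :=
  let asc := PySem.List.sorted (PySem.Set.ofList child) (fun y => y) false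
  let mapping := PySem.Dict.mk (buildPairs asc asc.length 0 0)
  child.map (fun c => mapping.getD c c)

-- ===== PRECONDITION & SPEC =====
-- Pre_ excludes only the empty child, on which A raises ValueError (max of empty sequence).
def Pre_mutation7 (child : List Int) (matrix : List (List Int)) : Prop := child ≠ []
instance (child : List Int) (matrix : List (List Int)) : Decidable (Pre_mutation7 child matrix) := by unfold Pre_mutation7; infer_instance
def pvWitness_mutation7 : List Int × List (List Int) := ([7, 2, 7, 5], [[1, 0], [0, 1]])

def Spec_mutation7 (child : List Int) (matrix : List (List Int)) (out : List Int) : Prop := out = mutation7_alt child matrix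
instance (child : List Int) (matrix : List (List Int)) (out : List Int) : Decidable (Spec_mutation7 child matrix out) := by unfold Spec_mutation7; infer_instance

-- ===== CLAIM (what is proved, stated in full; the proofs are below) =====
def Claim_equal_mutation7 : Prop := ∀ (child : List Int) (matrix : List (List Int)), Dom_mutation7 child matrix → Pre_mutation7 child matrix → Spec_mutation7 child matrix (mutation7 child matrix)
-- ===== LEMMAS AND PROOFS =====

theorem nextFree_ge (l : List Int) (i : Int) : i ≤ nextFree l i := by
  induction i using nextFree.induct l with
  | case1 x hx ih => rw [nextFree, dif_pos hx]; omega
  | case2 x hx => rw [nextFree, dif_neg hx]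

theorem nextFree_not_mem (l : List Int) (i : Int) : nextFree l i ∉ l := by
  induction i using nextFree.induct l with
  | case1 x hx ih => rw [nextFree, dif_pos hx]; exact ih
  | case2 x hx => rw [nextFree, dif_neg hx]; simpa using hx

theorem nextFree_fill (l : List Int) (i : Int) :
    ∀ k : Int, i ≤ k → k < nextFree l i → k ∈ l := by
  induction i using nextFree.induct l with
  | case1 x hx ih =>
      intro k hk1 hk2
      rw [nextFree, dif_pos hx] at hk2
      rcases eq_or_lt_of_le hk1 with rfl | hlt
      · simpa using hx
      · exact ih k (by omega) hk2
  | case2 x hx =>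
      intro k hk1 hk2
      rw [nextFree, dif_neg hx] at hk2
      omega

theorem nextFree_eq (l : List Int) {i j : Int} (hij : i ≤ j)
    (hfill : ∀ k : Int, i ≤ k → k < j → k ∈ l) (hj : j ∉ l) : nextFree l i = j := by
  rcases lt_trichotomy (nextFree l i) j with h | h | h
  · exact absurd (hfill _ (nextFree_ge l i) h) (nextFree_not_mem l i)
  · exact h
  · exact absurd (nextFree_fill l i j hij h) hj

theorem length_replaceFirst (l : List Int) (m v : Int) :
    (replaceFirst l m v).length = l.length := by
  induction l with
  | nil => rfl
  | cons a t ih => simp only [replaceFirst]; split_ifs <;> simp [ih]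

theorem mem_replaceFirst (l : List Int) (m v x : Int) (hnd : l.Nodup) (hm : m ∈ l) (hv : v ∉ l) :
    x ∈ replaceFirst l m v ↔ (x ∈ l ∧ x ≠ m) ∨ x = v := by
  induction l with
  | nil => simp at hm
  | cons a t ih =>
    simp only [replaceFirst]
    rcases List.nodup_cons.1 hnd with ⟨hat, hndt⟩
    by_cases ham : a = m
    · subst ham
      rw [if_pos rfl]
      simp only [List.mem_cons]
      constructor
      · rintro (rfl | hx)
        · right; rfl
        · left; exact ⟨Or.inr hx, fun hxa => hat (hxa ▸ hx)⟩
      · rintro (⟨(rfl | hx), hne⟩ | rfl)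
        · exact absurd rfl hne
        · right; exact hx
        · left; rfl
    · rw [if_neg ham]
      have hmt : m ∈ t := by rcases List.mem_cons.1 hm with rfl | h; exact absurd rfl ham; exact h
      have hvt : v ∉ t := fun h => hv (List.mem_cons_of_mem a h)
      simp only [List.mem_cons, ih hndt hmt hvt]
      constructor
      · rintro (rfl | (⟨hx, hne⟩ | rfl))
        · left; exact ⟨Or.inl rfl, ham⟩
        · left; exact ⟨Or.inr hx, hne⟩
        · right; rfl
      · rintro (⟨(rfl | hx), hne⟩ | rfl)
        · left; rfl
        · right; left; exact ⟨hx, hne⟩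
        · right; right; rfl

theorem replaceFirst_of_not_mem (l : List Int) (m v : Int) (hm : m ∉ l) :
    replaceFirst l m v = l := by
  induction l with
  | nil => rfl
  | cons a t ih =>
    simp only [replaceFirst]
    rw [if_neg (fun h => hm (by rw [← h]; exact List.mem_cons_self)), ih (fun h => hm (List.mem_cons_of_mem a h))]

theorem nodup_replaceFirst (l : List Int) (m v : Int) (hnd : l.Nodup) (hv : v ∉ l) :
    (replaceFirst l m v).Nodup := by
  induction l with
  | nil => exact List.nodup_nil
  | cons a t ih =>
    rcases List.nodup_cons.1 hnd with ⟨hat, hndt⟩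
    simp only [replaceFirst]
    by_cases ham : a = m
    · rw [if_pos ham]
      exact List.nodup_cons.2 ⟨fun h => hv (List.mem_cons_of_mem a h), hndt⟩
    · rw [if_neg ham]
      refine List.nodup_cons.2 ⟨?_, ih hndt (fun h => hv (List.mem_cons_of_mem a h))⟩
      intro hmem
      by_cases hmt : m ∈ t
      · rcases (mem_replaceFirst t m v a hndt hmt (fun h => hv (List.mem_cons_of_mem a h))).1 hmem with ⟨h1, _⟩ | rfl
        · exact hat h1
        · exact hv List.mem_cons_self
      · rw [replaceFirst_of_not_mem t m v hmt] at hmem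
        exact hat hmem

theorem getD_mk_nil (x d : Int) : (PySem.Dict.mk ([] : List (Int × Int))).getD x d = d := by
  simp [PySem.Dict.getD, PySem.Dict.get?]

theorem getD_mk_cons (k v : Int) (rest : List (Int × Int)) (x d : Int) :
    (PySem.Dict.mk ((k, v) :: rest)).getD x d = if k = x then v else (PySem.Dict.mk rest).getD x d := by
  simp only [PySem.Dict.getD, PySem.Dict.get?_mk_cons, beq_iff_eq]
  split_ifs <;> rfl

theorem getD_mk_not_mem (M : List (Int × Int)) (x d : Int) (h : ∀ p ∈ M, p.1 ≠ x) :
    (PySem.Dict.mk M).getD x d = d := by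
  induction M with
  | nil => exact getD_mk_nil x d
  | cons p t ih =>
    obtain ⟨k, v⟩ := p
    rw [getD_mk_cons, if_neg (h (k, v) List.mem_cons_self), ih (fun q hq => h q (List.mem_cons_of_mem _ hq))]

-- the reference relabeling-pair list used as a bridge between the two ports: it pairs the
-- distinct colors in descending order with the ascending free slots computed by nextFree
def buildMap (distinct : List Int) : List Int → Int → List (Int × Int)
  | [], _ => []
  | c :: cs, slot =>
    let s := nextFree distinct slot
    if s > c then []
    else (c, s) :: buildMap distinct cs (s + 1)

theorem buildMap_keys (D : List Int) (cs : List Int) :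
    ∀ (σ : Int) (p : Int × Int), p ∈ buildMap D cs σ → p.1 ∈ cs := by
  induction cs with
  | nil => intro σ p hp; simp [buildMap] at hp
  | cons c t ih =>
    intro σ p hp
    simp only [buildMap] at hp
    split_ifs at hp with h
    · simp at hp
    · rcases List.mem_cons.1 hp with rfl | hp'
      · exact List.mem_cons_self
      · exact List.mem_cons_of_mem _ (ih _ p hp')

theorem pvSortedDescStrict (xs : List Int) (h : xs.Nodup) :
    (PySem.List.sorted xs (fun y => y) true).Pairwise (fun a b => b < a) := by
  have h1 := PySem.List.sorted_pairwise_rev xs (fun y => y)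
  have h2 : (PySem.List.sorted xs (fun y => y) true).Nodup :=
    ((PySem.List.sorted_perm xs (fun y => y) true).nodup_iff).2 h
  exact (h1.and h2).imp (fun hab => lt_of_le_of_ne hab.1 (Ne.symm hab.2))

-- The A-side loop invariant: A's while-loop, started in a state reachable after relabeling
-- the colors D ∖ rem, returns the current child rewritten through the bridge map on rem.
theorem mutationLoop_eq (D : List Int) (rem : List Int) :
    ∀ (fuel : Nat) (i σ : Int) (colors child inserted : List Int),
    rem.length < fuel →
    colors ≠ [] →
    colors.Nodup →
    List.Pairwise (fun a b => b < a) rem →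
    (∀ r ∈ rem, r ∈ D) →
    (∀ x ∈ D, x ∉ rem → ∀ r ∈ rem, r < x) →
    (∀ x : Int, x ∈ colors ↔ (x ∈ rem ∨ x ∈ inserted)) →
    (∀ s ∈ inserted, s < σ ∧ s ∉ D) →
    i ≤ σ →
    (∀ j : Int, i ≤ j → j < σ → j ∈ colors) →
    mutationLoop fuel i colors child =
      child.map (fun c => (PySem.Dict.mk (buildMap D rem σ)).getD c c) := by
  induction rem with
  | nil =>
    intro fuel i σ colors child inserted hfuel hne hnd hpw hsub hrm hmem hins hiσ hfill
    obtain ⟨f, rfl⟩ : ∃ f, fuel = f + 1 := ⟨fuel - 1, by omega⟩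
    obtain ⟨a, t, rfl⟩ : ∃ a t, colors = a :: t := by
      cases colors with
      | nil => exact absurd rfl hne
      | cons a t => exact ⟨a, t, rfl⟩
    have hmx := PySem.List.max?_id_cons a t
    have hm_mem : t.foldl max a ∈ a :: t := PySem.List.max?_mem hmx
    have hjσ : σ ≤ nextFree (a :: t) i := by
      by_contra h
      exact nextFree_not_mem (a :: t) i (hfill _ (nextFree_ge (a :: t) i) (by omega))
    have hmax_ins : t.foldl max a ∈ ([] : List Int) ∨ t.foldl max a ∈ inserted := (hmem _).1 hm_mem
    have hmax_lt : t.foldl max a < σ := by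
      rcases hmax_ins with h | h
      · simp at h
      · exact (hins _ h).1
    simp only [mutationLoop, hmx, Option.getD_some]
    rw [if_pos (by omega)]
    simp only [buildMap]
    have : ∀ x ∈ child, (PySem.Dict.mk ([] : List (Int × Int))).getD x x = x :=
      fun x _ => getD_mk_nil x x
    rw [List.map_congr_left this]
    simp
  | cons c cs ih =>
    intro fuel i σ colors child inserted hfuel hne hnd hpw hsub hrm hmem hins hiσ hfill
    obtain ⟨f, rfl⟩ : ∃ f, fuel = f + 1 := ⟨fuel - 1, by omega⟩
    obtain ⟨a, t, rfl⟩ : ∃ a t, colors = a :: t := by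
      cases colors with
      | nil => exact absurd rfl hne
      | cons a t => exact ⟨a, t, rfl⟩
    have hmx := PySem.List.max?_id_cons a t
    set m := t.foldl max a with hmdef
    set j := nextFree (a :: t) i with hjdef
    have hm_mem : m ∈ a :: t := PySem.List.max?_mem hmx
    have hm_max : ∀ y ∈ a :: t, y ≤ m := fun y hy => PySem.List.max?_isMax hmx y hy
    have hj_ge : i ≤ j := nextFree_ge (a :: t) i
    have hj_not : j ∉ a :: t := nextFree_not_mem (a :: t) i
    have hjσ : σ ≤ j := by
      by_contra h
      exact hj_not (hfill j hj_ge (by omega))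
    have midrem : ∀ k : Int, σ ≤ k → k < j → k ∈ c :: cs := by
      intro k h1 h2
      have hk : k ∈ a :: t := nextFree_fill (a :: t) i k (by omega) h2
      rcases (hmem k).1 hk with h | h
      · exact h
      · exact absurd (hins k h).1 (by omega)
    have midD : ∀ k : Int, σ ≤ k → k < j → k ∈ D := fun k h1 h2 => hsub _ (midrem k h1 h2)
    have hcmem : c ∈ a :: t := (hmem c).2 (Or.inl List.mem_cons_self)
    have hcm : c ≤ m := hm_max c hcmem
    by_cases hbr : m < j
    · -- A breaks; B's slot already exceeds every remaining color, so the bridge map is empty.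
      have hsc : c < nextFree D σ := by
        by_cases hjD : j ∈ D
        · have hjrem : j ∉ c :: cs := fun h => hj_not ((hmem j).2 (Or.inl h))
          have hsj : j < nextFree D σ := by
            by_contra h
            rcases eq_or_lt_of_le (by omega : nextFree D σ ≤ j) with heq | hlt
            · exact nextFree_not_mem D σ (heq ▸ hjD)
            · exact nextFree_not_mem D σ (midD _ (nextFree_ge D σ) hlt)
          omega
        · have hsj : nextFree D σ = j := nextFree_eq D hjσ midD hjD
          omega
      simp only [mutationLoop, hmx, Option.getD_some]
      rw [if_pos hbr]
      simp only [buildMap]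
      rw [if_pos hsc]
      have : ∀ x ∈ child, (PySem.Dict.mk ([] : List (Int × Int))).getD x x = x :=
        fun x _ => getD_mk_nil x x
      rw [List.map_congr_left this]
      simp
    · have hbr' : j ≤ m := by omega
      clear hbr
      have hbr := hbr'
      have hminsN : m ∉ inserted := fun h => absurd (hins m h).1 (by omega)
      have hmrem : m ∈ c :: cs := by
        rcases (hmem m).1 hm_mem with h | h
        · exact h
        · exact absurd h hminsN
      have hcseq : m = c := by
        rcases List.mem_cons.1 hmrem with h | h
        · exact h
        · have := (List.pairwise_cons.1 hpw).1 m h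
          omega
      subst hcseq
      have hjD : j ∉ D := by
        intro hD
        have hjrem : j ∉ m :: cs := fun h => hj_not ((hmem j).2 (Or.inl h))
        have := hrm j hD hjrem m List.mem_cons_self
        omega
      have hsj : nextFree D σ = j := nextFree_eq D hjσ midD hjD
      have hjcs : j ∉ cs := fun h => hjD (hsub j (List.mem_cons_of_mem m h))
      have hmcs : m ∉ cs := fun h => absurd ((List.pairwise_cons.1 hpw).1 m h) (by omega)
      simp only [mutationLoop, hmx, Option.getD_some]
      rw [if_neg (by omega)]
      simp only [buildMap]
      rw [hsj, if_neg (by omega)]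
      have hrec := ih f j (j + 1) (replaceFirst (a :: t) m j)
        (child.map (fun x => if x = m then j else x)) (inserted ++ [j])
        (by simpa using Nat.lt_of_succ_lt_succ hfuel)
        (by
          intro h
          have := length_replaceFirst (a :: t) m j
          rw [h] at this
          simp at this)
        (nodup_replaceFirst (a :: t) m j hnd hj_not)
        ((List.pairwise_cons.1 hpw).2)
        (fun r hr => hsub r (List.mem_cons_of_mem m hr))
        (by
          intro x hxD hxcs
          by_cases hxm : x = m
          · subst hxm
            exact fun r hr => (List.pairwise_cons.1 hpw).1 r hr
          · have hxrem : x ∉ m :: cs := by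
              intro h
              rcases List.mem_cons.1 h with h' | h'
              · exact hxm h'
              · exact hxcs h'
            exact fun r hr => hrm x hxD hxrem r (List.mem_cons_of_mem m hr))
        (by
          intro x
          rw [mem_replaceFirst (a :: t) m j x hnd hm_mem hj_not]
          constructor
          · rintro (⟨hx, hne⟩ | rfl)
            · rcases (hmem x).1 hx with h | h
              · rcases List.mem_cons.1 h with h' | h'
                · exact absurd h' hne
                · exact Or.inl h'
              · exact Or.inr (by simp [h])
            · exact Or.inr (by simp)
          · intro h
            rcases h with h | h
            · exact Or.inl ⟨(hmem x).2 (Or.inl (List.mem_cons_of_mem m h)),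
                fun hxm => hmcs (hxm ▸ h)⟩
            · rcases List.mem_append.1 h with h' | h'
              · refine Or.inl ⟨(hmem x).2 (Or.inr h'), ?_⟩
                intro hxm
                exact (hins x h').2 (hxm ▸ hsub m List.mem_cons_self)
              · exact Or.inr (by simpa using h'))
        (by
          intro s hs
          rcases List.mem_append.1 hs with h | h
          · exact ⟨by have := (hins s h).1; omega, (hins s h).2⟩
          · simp at h
            subst h
            exact ⟨by omega, hjD⟩)
        (by omega)
        (by
          intro k h1 h2
          have hkj : k = j := by omega
          rw [hkj, mem_replaceFirst (a :: t) m j j hnd hm_mem hj_not]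
          exact Or.inr rfl)
      rw [hrec, List.map_map]
      refine List.map_congr_left ?_
      intro x _
      simp only [Function.comp_apply]
      rw [getD_mk_cons]
      by_cases hxm : x = m
      · subst hxm
        rw [if_pos rfl, if_pos rfl]
        exact getD_mk_not_mem _ j j
          (fun p hp hpj => hjcs (hpj ▸ buildMap_keys D cs (j + 1) p hp))
      · rw [if_neg hxm, if_neg (fun h => hxm h.symm)]

-- B-side bridge helpers: getD access to elements and pairwise order
theorem getD_mem (asc : List Int) (i : Nat) (h : i < asc.length) : asc.getD i 0 ∈ asc := by
  rw [List.getD_eq_getElem asc 0 h]; exact List.getElem_mem h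

theorem pairwise_getD (asc : List Int) (hasc : asc.Pairwise (· < ·)) (i j : Nat)
    (hij : i < j) (hj : j < asc.length) : asc.getD i 0 < asc.getD j 0 := by
  rw [List.getD_eq_getElem asc 0 (by omega), List.getD_eq_getElem asc 0 hj]
  exact List.pairwise_iff_getElem.1 hasc i j (by omega) hj hij

-- B-side bridge: skipBelow's postconditions
theorem skipBelow_spec (asc : List Int) (slot : Int) :
    ∀ (lo : Nat), lo ≤ asc.length →
    lo ≤ skipBelow asc lo slot ∧ skipBelow asc lo slot ≤ asc.length ∧
    (∀ i, lo ≤ i → i < skipBelow asc lo slot → asc.getD i 0 < slot) ∧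
    (skipBelow asc lo slot < asc.length → slot ≤ asc.getD (skipBelow asc lo slot) 0) := by
  intro lo
  induction lo using skipBelow.induct asc slot with
  | case1 x hx hlt ih =>
    intro _
    rw [skipBelow, dif_pos hx, if_pos hlt]
    obtain ⟨i1, i2, i3, i4⟩ := ih (by omega)
    refine ⟨by omega, i2, ?_, i4⟩
    intro i h1 h2
    rcases eq_or_lt_of_le h1 with rfl | h
    · exact hlt
    · exact i3 i (by omega) h2
  | case2 x hx hlt =>
    intro _
    rw [skipBelow, dif_pos hx, if_neg hlt]
    exact ⟨le_rfl, by omega, by omega, fun _ => by omega⟩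
  | case3 x hx =>
    intro hle
    rw [skipBelow, dif_neg hx]
    exact ⟨le_rfl, hle, by omega, fun h => absurd h hx⟩

-- B-side bridge: skipRun's postconditions (its result is the next free slot)
theorem skipRun_spec (asc : List Int) (hasc : asc.Pairwise (· < ·)) :
    ∀ (lo : Nat) (slot : Int), lo ≤ asc.length →
    (∀ i, i < lo → asc.getD i 0 < slot) →
    (lo < asc.length → slot ≤ asc.getD lo 0) →
    slot ≤ (skipRun asc lo slot).2 ∧
    (skipRun asc lo slot).1 ≤ asc.length ∧
    (∀ k : Int, slot ≤ k → k < (skipRun asc lo slot).2 → k ∈ asc) ∧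
    (skipRun asc lo slot).2 ∉ asc ∧
    (∀ i, i < (skipRun asc lo slot).1 → asc.getD i 0 < (skipRun asc lo slot).2) ∧
    ((skipRun asc lo slot).1 < asc.length → (skipRun asc lo slot).2 < asc.getD (skipRun asc lo slot).1 0) := by
  intro lo slot
  induction lo, slot using skipRun.induct asc with
  | case1 lo hx ih =>
    intro _ hbelow _
    rw [skipRun, dif_pos hx, if_pos rfl]
    obtain ⟨c1, c2, c3, c4, c5, c6⟩ := ih (by omega)
      (by
        intro i hi
        rcases Nat.lt_succ_iff_lt_or_eq.1 hi with h | rfl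
        · exact lt_trans (hbelow i h) (by omega)
        · omega)
      (fun h => pairwise_getD asc hasc lo (lo + 1) (by omega) h)
    refine ⟨by omega, c2, ?_, c4, c5, c6⟩
    intro k hk1 hk2
    rcases eq_or_lt_of_le hk1 with rfl | h
    · exact getD_mem asc lo hx
    · exact c3 k (by omega) hk2
  | case2 lo slot hx hne =>
    intro hle hbelow hat
    rw [skipRun, dif_pos hx, if_neg hne]
    refine ⟨le_rfl, hle, fun k h1 h2 => absurd h2 (by omega), ?_, hbelow,
      fun h => lt_of_le_of_ne (hat hx) (fun he => hne he.symm)⟩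
    intro hmem
    obtain ⟨i, hi, hieq⟩ := List.mem_iff_getElem.1 hmem
    rw [← List.getD_eq_getElem asc 0 hi] at hieq
    rcases lt_trichotomy i lo with h | rfl | h
    · exact absurd hieq (by have := hbelow i h; omega)
    · exact hne hieq
    · have := pairwise_getD asc hasc lo i h hi
      have := hat hx
      omega
  | case3 lo slot hx =>
    intro hle hbelow _
    rw [skipRun, dif_neg hx]
    refine ⟨le_rfl, hle, fun k h1 h2 => absurd h2 (by omega), ?_, hbelow, fun h => absurd h hx⟩
    intro hmem
    obtain ⟨i, hi, hieq⟩ := List.mem_iff_getElem.1 hmem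
    rw [← List.getD_eq_getElem asc 0 hi] at hieq
    exact absurd hieq (by have := hbelow i (by omega); omega)

-- B's merge loop builds exactly the bridge map on the reversed prefix of asc
theorem buildPairs_eq (D asc : List Int) (hasc : asc.Pairwise (· < ·))
    (hmem : ∀ x : Int, x ∈ asc ↔ x ∈ D) :
    ∀ (h : Nat), h ≤ asc.length → ∀ (lo : Nat) (slot : Int), lo ≤ asc.length →
    (∀ i, i < lo → asc.getD i 0 < slot) →
    buildPairs asc h lo slot = buildMap D ((asc.take h).reverse) slot := by
  intro h
  induction h with
  | zero =>
    intro _ lo slot _ _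
    simp [buildPairs, buildMap]
  | succ h ih =>
    intro hh lo slot hlo hbelow
    have hhl : h < asc.length := hh
    have htake : (asc.take (h + 1)).reverse = asc.getD h 0 :: (asc.take h).reverse := by
      rw [List.take_add_one, List.getElem?_eq_getElem hhl, List.getD_eq_getElem asc 0 hhl]
      simp
    rw [htake]
    obtain ⟨b1, b2, b3, b4⟩ := skipBelow_spec asc slot lo hlo
    have hbelow1 : ∀ i, i < skipBelow asc lo slot → asc.getD i 0 < slot := by
      intro i hi
      rcases lt_or_ge i lo with h' | h'
      · exact hbelow i h'
      · exact b3 i h' hi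
    obtain ⟨c1, c2, c3, c4, c5, c6⟩ := skipRun_spec asc hasc (skipBelow asc lo slot) slot b2 hbelow1 b4
    have hnf : nextFree D slot = (skipRun asc (skipBelow asc lo slot) slot).2 :=
      nextFree_eq D c1 (fun k hk1 hk2 => (hmem k).1 (c3 k hk1 hk2)) (fun hin => c4 ((hmem _).2 hin))
    simp only [buildPairs, buildMap, hnf]
    by_cases hgt : (skipRun asc (skipBelow asc lo slot) slot).2 > asc.getD h 0
    · rw [if_pos hgt, if_pos hgt]
    · rw [if_neg hgt, if_neg hgt]
      rw [ih (by omega) (skipRun asc (skipBelow asc lo slot) slot).1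
        ((skipRun asc (skipBelow asc lo slot) slot).2 + 1) c2
        (fun i hi => by have := c5 i hi; omega)]

-- ===== VERDICT (by name: the statement is the Claim_ definition above) =====
theorem mutation7_spec : Claim_equal_mutation7 := by
  intro child matrix _ hpre
  unfold Spec_mutation7 mutation7 mutation7_alt
  have hfold : (child.foldl (fun acc c => if acc.contains c then acc else acc ++ [c]) []) = PySem.Set.ofList child := rfl
  rw [hfold]
  have hnd : (PySem.Set.ofList child).Nodup := PySem.Set.nodup_ofList child
  have hne : PySem.Set.ofList child ≠ [] := by
    cases child with
    | nil => exact absurd rfl hpre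
    | cons a t =>
      intro h
      have : a ∈ PySem.Set.ofList (a :: t) := (PySem.Set.mem_ofList (a :: t) a).2 List.mem_cons_self
      rw [h] at this
      simp at this
  have hA := mutationLoop_eq (PySem.Set.ofList child)
    (PySem.List.sorted (PySem.Set.ofList child) (fun y => y) true)
    ((PySem.Set.ofList child).length + 1) 0 0 (PySem.Set.ofList child) child []
    (by
      have := (PySem.List.sorted_perm (PySem.Set.ofList child) (fun y => y) true).length_eq
      omega)
    hne hnd
    (pvSortedDescStrict (PySem.Set.ofList child) hnd)
    (fun r hr => (PySem.List.mem_sorted _ _ _ r).1 hr)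
    (fun x hx hxr => absurd ((PySem.List.mem_sorted _ _ _ x).2 hx) hxr)
    (fun x => by simp [PySem.List.mem_sorted])
    (by simp)
    le_rfl
    (by omega)
  rw [hA]
  show _ = List.map (fun c => (PySem.Dict.mk (buildPairs
      (PySem.List.sorted (PySem.Set.ofList child) (fun y => y) false)
      (PySem.List.sorted (PySem.Set.ofList child) (fun y => y) false).length 0 0)).getD c c) child
  -- bridge the two pair lists
  have hasc : (PySem.List.sorted (PySem.Set.ofList child) (fun y => y) false).Pairwise (· < ·) :=
    PySem.List.sorted_ofList_pairwise_lt child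
  have hB := buildPairs_eq (PySem.Set.ofList child)
    (PySem.List.sorted (PySem.Set.ofList child) (fun y => y) false) hasc
    (fun x => PySem.List.mem_sorted _ _ _ x)
    (PySem.List.sorted (PySem.Set.ofList child) (fun y => y) false).length le_rfl 0 0
    (by omega) (by omega)
  rw [hB, List.take_length]
  have hdesc : PySem.List.sorted (PySem.Set.ofList child) (fun y => y) true
      = (PySem.List.sorted (PySem.Set.ofList child) (fun y => y) false).reverse := by
    apply PySem.List.sorted_rev_eq_of_perm_of_pairwise_gt
    · exact (List.reverse_perm _).trans (PySem.List.sorted_perm _ _ _)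
    · exact (List.pairwise_reverse).2 hasc
  rw [hdesc]
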